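-- pv_equiv track=rewrite | github.com/pypi-data/pypi-mirror-282 | packages/openla-feature-representation/openla_feature_representation-0.1.3a1.tar.gz/openla_feature_representation-0.1.3a1/openla_feature_representation/alp/utils.py | a_b_c_d_f_orders
-- ===== SOURCE A (Python) =====
-- def a_b_c_d_f_orders(grade_labels):
--     a_orders = list()
--     b_orders = list()
--     c_orders = list()
--     d_orders = list()
--     f_orders = list()
--     for i in range(len(grade_labels['grade'])):
--         if grade_labels['grade'][i] == 'A':
--             a_orders.append(i)
--         elif grade_labels['grade'][i] == 'B':
--             b_orders.append(i)
--         elif grade_labels['grade'][i] == 'C':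
--             c_orders.append(i)
--         elif grade_labels['grade'][i] == 'D':
--             d_orders.append(i)
--         else:
--             f_orders.append(i)
--     return a_orders, b_orders, c_orders, d_orders, f_orders
-- ===== SOURCE B (Python) =====
-- def a_b_c_d_f_orders(grade_labels):
--     grades = grade_labels['grade']
--     a_orders = [i for i, g in enumerate(grades) if g == 'A']
--     b_orders = [i for i, g in enumerate(grades) if g == 'B']
--     c_orders = [i for i, g in enumerate(grades) if g == 'C']
--     d_orders = [i for i, g in enumerate(grades) if g == 'D']
--     f_orders = [i for i, g in enumerate(grades) if g not in ('A', 'B', 'C', 'D')]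
--     return a_orders, b_orders, c_orders, d_orders, f_orders
-- ===== Notes on version B (the rewrite author's own statement) =====
-- stated objective: idiomatic
-- what changed: The single index loop with an if/elif chain appending to five mutable accumulators is replaced by five independent list comprehensions over enumerate(grades), one per bucket, with the F bucket selected by negated membership in ('A','B','C','D').
import Mathlib
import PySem

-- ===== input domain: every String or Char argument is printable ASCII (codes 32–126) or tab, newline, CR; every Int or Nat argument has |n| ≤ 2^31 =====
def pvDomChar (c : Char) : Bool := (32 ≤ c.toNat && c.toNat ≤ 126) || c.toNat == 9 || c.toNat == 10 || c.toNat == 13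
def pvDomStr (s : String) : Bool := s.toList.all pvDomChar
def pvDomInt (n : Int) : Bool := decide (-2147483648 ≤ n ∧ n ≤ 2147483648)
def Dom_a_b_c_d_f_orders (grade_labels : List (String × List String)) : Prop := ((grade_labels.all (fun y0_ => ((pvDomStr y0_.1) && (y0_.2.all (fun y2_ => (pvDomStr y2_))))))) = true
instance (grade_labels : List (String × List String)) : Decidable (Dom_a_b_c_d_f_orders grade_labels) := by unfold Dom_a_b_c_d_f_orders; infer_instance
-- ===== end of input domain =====

-- B replaces A's single if/elif loop over indices by five independent comprehensions over
-- enumerate(grades), one per bucket (idiomatic; same O(n) cost up to a constant factor).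

-- ===== PORT A =====
def a_b_c_d_f_orders (grade_labels : List (String × List String)) : List Int × List Int × List Int × List Int × List Int :=
  match (PySem.Dict.mk grade_labels).get? "grade" with
  | none => ([], [], [], [], [])   -- KeyError in Python; excluded by Pre_
  | some g =>
    (PySem.List.pyRange 0 (PySem.List.len g)).foldl
      (fun st i =>
        if PySem.List.pyGetD g i "" = "A" then (st.1 ++ [i], st.2.1, st.2.2.1, st.2.2.2.1, st.2.2.2.2)
        else if PySem.List.pyGetD g i "" = "B" then (st.1, st.2.1 ++ [i], st.2.2.1, st.2.2.2.1, st.2.2.2.2)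
        else if PySem.List.pyGetD g i "" = "C" then (st.1, st.2.1, st.2.2.1 ++ [i], st.2.2.2.1, st.2.2.2.2)
        else if PySem.List.pyGetD g i "" = "D" then (st.1, st.2.1, st.2.2.1, st.2.2.2.1 ++ [i], st.2.2.2.2)
        else (st.1, st.2.1, st.2.2.1, st.2.2.2.1, st.2.2.2.2 ++ [i]))
      ([], [], [], [], [])

-- ===== PORT B =====
def a_b_c_d_f_orders_alt (grade_labels : List (String × List String)) : List Int × List Int × List Int × List Int × List Int :=
  match (PySem.Dict.mk grade_labels).get? "grade" with
  | none => ([], [], [], [], [])   -- KeyError in Python; excluded by Pre_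
  | some grades =>
    let en := PySem.List.enumerate grades
    ( en.filterMap (fun p => if p.2 = "A" then some p.1 else none),
      en.filterMap (fun p => if p.2 = "B" then some p.1 else none),
      en.filterMap (fun p => if p.2 = "C" then some p.1 else none),
      en.filterMap (fun p => if p.2 = "D" then some p.1 else none),
      en.filterMap (fun p => if p.2 ∉ (["A", "B", "C", "D"] : List String) then some p.1 else none) )

-- ===== PRECONDITION & SPEC =====
-- Pre_ excludes exactly the dicts without a "grade" key, on which Python A raises KeyError.
def Pre_a_b_c_d_f_orders (grade_labels : List (String × List String)) : Prop :=
  ((PySem.Dict.mk grade_labels).get? "grade").isSome = true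
instance (grade_labels : List (String × List String)) : Decidable (Pre_a_b_c_d_f_orders grade_labels) := by unfold Pre_a_b_c_d_f_orders; infer_instance
def pvWitness_a_b_c_d_f_orders : (List (String × List String)) := ([("grade", ["A", "F", "B"])])

def Spec_a_b_c_d_f_orders (grade_labels : List (String × List String)) (out : List Int × List Int × List Int × List Int × List Int) : Prop := out = a_b_c_d_f_orders_alt grade_labels
instance (grade_labels : List (String × List String)) (out : List Int × List Int × List Int × List Int × List Int) : Decidable (Spec_a_b_c_d_f_orders grade_labels out) := by unfold Spec_a_b_c_d_f_orders; infer_instance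

-- ===== CLAIM (what is proved, stated in full; the proofs are below) =====
def Claim_equal_a_b_c_d_f_orders : Prop := ∀ (grade_labels : List (String × List String)), Dom_a_b_c_d_f_orders grade_labels → Pre_a_b_c_d_f_orders grade_labels → Spec_a_b_c_d_f_orders grade_labels (a_b_c_d_f_orders grade_labels)

-- ===== LEMMAS AND PROOFS =====

/-- The if/elif step of A's loop, acting on an (index, grade) pair. -/
def pvStep (st : List Int × List Int × List Int × List Int × List Int) (p : Int × String) :
    List Int × List Int × List Int × List Int × List Int :=
  if p.2 = "A" then (st.1 ++ [p.1], st.2.1, st.2.2.1, st.2.2.2.1, st.2.2.2.2)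
  else if p.2 = "B" then (st.1, st.2.1 ++ [p.1], st.2.2.1, st.2.2.2.1, st.2.2.2.2)
  else if p.2 = "C" then (st.1, st.2.1, st.2.2.1 ++ [p.1], st.2.2.2.1, st.2.2.2.2)
  else if p.2 = "D" then (st.1, st.2.1, st.2.2.1, st.2.2.2.1 ++ [p.1], st.2.2.2.2)
  else (st.1, st.2.1, st.2.2.1, st.2.2.2.1, st.2.2.2.2 ++ [p.1])

/-- Folding A's step over any pair list appends each bucket's selection to the accumulator. -/
theorem pvFold_eq (ps : List (Int × String)) :
    ∀ (a b c d f : List Int),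
      ps.foldl pvStep (a, b, c, d, f) =
        ( a ++ ps.filterMap (fun p => if p.2 = "A" then some p.1 else none),
          b ++ ps.filterMap (fun p => if p.2 = "B" then some p.1 else none),
          c ++ ps.filterMap (fun p => if p.2 = "C" then some p.1 else none),
          d ++ ps.filterMap (fun p => if p.2 = "D" then some p.1 else none),
          f ++ ps.filterMap (fun p => if p.2 ∉ (["A", "B", "C", "D"] : List String) then some p.1 else none) ) := by
  induction ps with
  | nil => simp
  | cons p ps ih =>
    intro a b c d f
    simp only [List.foldl_cons, List.filterMap_cons, pvStep]
    split_ifs with h1 h2 h3 h4 <;> rw [ih] <;> clear ih <;>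
      simp_all [List.mem_cons, List.append_assoc]

theorem a_b_c_d_f_orders_eq (grade_labels : List (String × List String))
    (_h : Pre_a_b_c_d_f_orders grade_labels) :
    a_b_c_d_f_orders grade_labels = a_b_c_d_f_orders_alt grade_labels := by
  unfold a_b_c_d_f_orders a_b_c_d_f_orders_alt
  cases hg : (PySem.Dict.mk grade_labels).get? "grade" with
  | none => rfl
  | some g =>
    have hmap := PySem.List.enumerate_eq_map_pyRange g ""
    calc (PySem.List.pyRange 0 (PySem.List.len g)).foldl
            (fun st i =>
              if PySem.List.pyGetD g i "" = "A" then (st.1 ++ [i], st.2.1, st.2.2.1, st.2.2.2.1, st.2.2.2.2)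
              else if PySem.List.pyGetD g i "" = "B" then (st.1, st.2.1 ++ [i], st.2.2.1, st.2.2.2.1, st.2.2.2.2)
              else if PySem.List.pyGetD g i "" = "C" then (st.1, st.2.1, st.2.2.1 ++ [i], st.2.2.2.1, st.2.2.2.2)
              else if PySem.List.pyGetD g i "" = "D" then (st.1, st.2.1, st.2.2.1, st.2.2.2.1 ++ [i], st.2.2.2.2)
              else (st.1, st.2.1, st.2.2.1, st.2.2.2.1, st.2.2.2.2 ++ [i]))
            ([], [], [], [], [])
        = (PySem.List.enumerate g).foldl pvStep ([], [], [], [], []) := by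
          rw [hmap, List.foldl_map]
          rfl
      _ = _ := by
          rw [pvFold_eq]
          simp

-- ===== VERDICT (by name: the statement is the Claim_ definition above) =====
theorem a_b_c_d_f_orders_spec : Claim_equal_a_b_c_d_f_orders := by
  intro gl _hDom hPre
  unfold Spec_a_b_c_d_f_orders
  exact a_b_c_d_f_orders_eq gl hPre
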